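-- pv_equiv track=rewrite | github.com/Daidai1031/SocratiDesk | app.py | looks_like_new_topic
-- ===== SOURCE A (Python) =====
-- def looks_like_new_topic(message: str) -> bool:
--     text = message.strip().lower()
--
--     new_topic_starters = [
--         "what is",
--         "what are",
--         "who is",
--         "who are",
--         "explain",
--         "tell me about",
--         "how does",
--         "how do",
--         "why is",
--         "why are",
--         "define"
--     ]
--
--     return any(text.startswith(starter) for starter in new_topic_starters)
-- ===== SOURCE B (Python) =====
-- _BUCKETS = (
--     (6, {"who is", "how do", "why is", "define"}),
--     (7, {"what is", "who are", "explain", "why are"}),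
--     (8, {"what are", "how does"}),
--     (13, {"tell me about"}),
-- )
--
--
-- def looks_like_new_topic(message: str) -> bool:
--     text = message.strip().lower()
--     return any(text[:n] in bucket for n, bucket in _BUCKETS)
-- ===== Notes on version B (the rewrite author's own statement) =====
-- stated objective: alternative
-- what changed: Replaces the scan of 11 startswith tests with a length-indexed table: the starters are grouped by length into 4 sets, and B checks whether any of the 4 corresponding prefixes of the text is a member of its set.
import Mathlib
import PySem

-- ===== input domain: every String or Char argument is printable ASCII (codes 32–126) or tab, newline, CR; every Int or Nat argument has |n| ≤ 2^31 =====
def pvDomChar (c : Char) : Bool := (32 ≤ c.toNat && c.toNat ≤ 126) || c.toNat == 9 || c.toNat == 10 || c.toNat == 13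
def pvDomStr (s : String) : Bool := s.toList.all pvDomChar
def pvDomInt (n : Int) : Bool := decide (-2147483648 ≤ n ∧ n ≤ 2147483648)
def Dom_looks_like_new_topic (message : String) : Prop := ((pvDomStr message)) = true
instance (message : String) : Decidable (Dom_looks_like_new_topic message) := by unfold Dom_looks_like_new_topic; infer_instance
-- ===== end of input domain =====

-- B replaces the scan of 11 startswith tests by a length-indexed table of four prefix sets (alternative decomposition; same behaviour).

-- ===== PORT A =====
def looks_like_new_topic (message : String) : Bool :=
  let text := PySem.Str.lower (PySem.Str.strip message)
  let new_topic_starters : List String :=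
    ["what is", "what are", "who is", "who are", "explain", "tell me about",
     "how does", "how do", "why is", "why are", "define"]
  new_topic_starters.any (fun starter => PySem.Str.startswith text starter)

-- ===== PORT B =====
-- _BUCKETS: the starters grouped by length, each group a Python set
def pvBuckets : List (Int × PySem.Set String) :=
  [(6, PySem.Set.ofList ["who is", "how do", "why is", "define"]),
   (7, PySem.Set.ofList ["what is", "who are", "explain", "why are"]),
   (8, PySem.Set.ofList ["what are", "how does"]),
   (13, PySem.Set.ofList ["tell me about"])]

def looks_like_new_topic_alt (message : String) : Bool :=
  let text := PySem.Str.lower (PySem.Str.strip message)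
  pvBuckets.any (fun nb => PySem.Set.contains nb.2 (PySem.Str.slice text none (some nb.1)))

-- ===== PRECONDITION & SPEC =====
def Spec_looks_like_new_topic (message : String) (out : Bool) : Prop := out = looks_like_new_topic_alt message
instance (message : String) (out : Bool) : Decidable (Spec_looks_like_new_topic message out) := by unfold Spec_looks_like_new_topic; infer_instance

-- ===== CLAIM (what is proved, stated in full; the proofs are below) =====
def Claim_equal_looks_like_new_topic : Prop := ∀ (message : String), Dom_looks_like_new_topic message → Spec_looks_like_new_topic message (looks_like_new_topic message)

-- ===== LEMMAS AND PROOFS =====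

-- text[:n] == p  is exactly  text.startswith(p)  when n = len(p)
theorem pv_atom (t p : String) (n : Int) (h : n = (p.toList.length : Int)) :
    (PySem.Str.slice t none (some n) == p) = PySem.Str.startswith t p := by
  subst h
  have hs : (PySem.Str.slice t none (some (p.toList.length : Int))).toList
      = t.toList.take p.toList.length := by simp [pysem]
  have hsub : PySem.Str.startswith t p = PySem.Chars.startswith t.toList p.toList := by
    simp [pysem]
  apply Bool.eq_iff_iff.mpr
  rw [beq_iff_eq, hsub, PySem.Chars.startswith_iff, List.prefix_iff_eq_take,
    ← String.toList_inj, hs, eq_comm]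

-- ===== VERDICT (by name: the statement is the Claim_ definition above) =====
theorem looks_like_new_topic_spec : Claim_equal_looks_like_new_topic := by
  intro message _
  unfold Spec_looks_like_new_topic looks_like_new_topic looks_like_new_topic_alt pvBuckets
  set t := PySem.Str.lower (PySem.Str.strip message) with ht
  have e6 : PySem.Set.ofList ["who is", "how do", "why is", "define"]
      = ["who is", "how do", "why is", "define"] := by decide
  have e7 : PySem.Set.ofList ["what is", "who are", "explain", "why are"]
      = ["what is", "who are", "explain", "why are"] := by decide
  have e8 : PySem.Set.ofList ["what are", "how does"] = ["what are", "how does"] := by decide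
  have e13 : PySem.Set.ofList ["tell me about"] = ["tell me about"] := by decide
  rw [e6, e7, e8, e13]
  simp only [List.any_cons, List.any_nil, Bool.or_false, PySem.Set.contains,
    List.contains, List.elem_cons, List.elem_nil]
  rw [pv_atom t "who is" 6 (by decide), pv_atom t "how do" 6 (by decide),
    pv_atom t "why is" 6 (by decide), pv_atom t "define" 6 (by decide),
    pv_atom t "what is" 7 (by decide), pv_atom t "who are" 7 (by decide),
    pv_atom t "explain" 7 (by decide), pv_atom t "why are" 7 (by decide),
    pv_atom t "what are" 8 (by decide), pv_atom t "how does" 8 (by decide),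
    pv_atom t "tell me about" 13 (by decide)]
  clear ht e6 e7 e8 e13
  generalize PySem.Str.startswith t "what is" = b1
  generalize PySem.Str.startswith t "what are" = b2
  generalize PySem.Str.startswith t "who is" = b3
  generalize PySem.Str.startswith t "who are" = b4
  generalize PySem.Str.startswith t "explain" = b5
  generalize PySem.Str.startswith t "tell me about" = b6
  generalize PySem.Str.startswith t "how does" = b7
  generalize PySem.Str.startswith t "how do" = b8
  generalize PySem.Str.startswith t "why is" = b9
  generalize PySem.Str.startswith t "why are" = b10
  generalize PySem.Str.startswith t "define" = b11
  revert b1 b2 b3 b4 b5 b6 b7 b8 b9 b10 b11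
  decide
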